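-- pv_equiv track=rewrite | github.com/ad-astra-per-ardua/Solving-Algorithm | CodeForce/Codeforces Round 871 (Div. 4) Prob_E.py | solve
-- ===== SOURCE A (Python) =====
-- from typing import List
--
-- def solve(grid: List[List[int]]) -> int:
--     n, m = len(grid), len(grid[0])
--     visited = [[False] * m for _ in range(n)]
--
--     def dfs(i, j):
--         stack = [(i, j)]
--         volume = 0
--         while stack:
--             i, j = stack.pop()
--             if not visited[i][j]:
--                 visited[i][j] = True
--                 if grid[i][j] == 0:
--                     continue
--                 volume += grid[i][j]
--                 for ni, nj in [(i-1, j), (i+1, j), (i, j-1), (i, j+1)]: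
--                     if 0 <= ni < n and 0 <= nj < m and not visited[ni][nj]:
--                         stack.append((ni, nj))
--         return volume
--
--     max_lake_volume = 0
--     for i in range(n):
--         for j in range(m):
--             if not visited[i][j]:
--                 max_lake_volume = max(max_lake_volume, dfs(i, j))
--
--     return max_lake_volume
-- ===== SOURCE B (Python) =====
-- from typing import List
--
-- def solve(grid: List[List[int]]) -> int:
--     n, m = len(grid), len(grid[0])
--     seen = set()
--     best = 0
--     for i in range(n):
--         for j in range(m):
--             if grid[i][j] != 0 and (i, j) not in seen:
--                 comp = {(i, j)}
--                 frontier = {(i, j)}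
--                 while frontier:
--                     nf = set()
--                     for (a, b) in frontier:
--                         for (x, y) in ((a - 1, b), (a + 1, b), (a, b - 1), (a, b + 1)):
--                             if 0 <= x < n and 0 <= y < m and grid[x][y] != 0 and (x, y) not in comp:
--                                 comp.add((x, y))
--                                 nf.add((x, y))
--                     frontier = nf
--                 seen |= comp
--                 best = max(best, sum(grid[a][b] for (a, b) in comp))
--     return best
-- ===== Notes on version B (the rewrite author's own statement) =====
-- stated objective: alternative
-- what changed: Replaces the stack-based DFS flood fill with a shared visited matrix (which also marks zero 'halo' cells) by a set-based frontier BFS that builds each nonzero component as a set of coordinates, never touches zero cells, and keeps a set of already-summed nonzero cells.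
import Mathlib
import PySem

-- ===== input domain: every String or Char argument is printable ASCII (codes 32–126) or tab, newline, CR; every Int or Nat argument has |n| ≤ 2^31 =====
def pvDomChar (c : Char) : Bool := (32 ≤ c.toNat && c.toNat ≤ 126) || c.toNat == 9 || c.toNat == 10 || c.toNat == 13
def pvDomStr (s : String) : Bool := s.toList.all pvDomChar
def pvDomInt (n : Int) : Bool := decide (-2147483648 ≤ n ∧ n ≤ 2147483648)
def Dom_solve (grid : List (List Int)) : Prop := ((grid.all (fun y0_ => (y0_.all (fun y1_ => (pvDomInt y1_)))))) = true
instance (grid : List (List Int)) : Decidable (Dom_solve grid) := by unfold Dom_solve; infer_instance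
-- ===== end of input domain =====

-- B replaces A's stack-based DFS flood fill (shared visited matrix, zero halo cells marked too)
-- by a set-based frontier BFS per nonzero component plus a set of already-summed nonzero cells;
-- objective: alternative (same asymptotic cost, different data structures and traversal).

-- ===== PORT A =====
-- grid[i][j] read; within Pre_ every such access is in range, so the default is never returned
def cellVal (grid : List (List Int)) (i j : Int) : Int :=
  ((PySem.List.pyGet? ((PySem.List.pyGet? grid i).getD []) j)).getD 0

-- visited[i][j] read / visited[i][j] = True; all accesses A makes are bounds-checked in range
def vget (v : List (List Bool)) (i j : Int) : Bool :=
  ((PySem.List.pyGet? ((PySem.List.pyGet? v i).getD []) j)).getD false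

def vset (v : List (List Bool)) (i j : Int) : List (List Bool) :=
  PySem.List.pySetD v i (PySem.List.pySetD ((PySem.List.pyGet? v i).getD []) j true)

-- the 'while stack' loop of dfs; stack top is the list head (Python pops/pushes at the end);
-- fuel only makes the recursion total — with the fuel solve supplies, the stack always empties first
def dfsA (grid : List (List Int)) (n m : Nat) :
    Nat → List (Int × Int) → List (List Bool) → Int → List (List Bool) × Int
  | _, [], v, vol => (v, vol)
  | 0, _ :: _, v, vol => (v, vol)
  | fuel + 1, (i, j) :: rest, v, vol =>
    if vget v i j then dfsA grid n m fuel rest v vol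
    else
      let v' := vset v i j
      if cellVal grid i j = 0 then dfsA grid n m fuel rest v' vol
      else
        let push := ([(i - 1, j), (i + 1, j), (i, j - 1), (i, j + 1)] : List (Int × Int)).filter
          (fun q => decide (0 ≤ q.1) && decide (q.1 < (n : Int)) && decide (0 ≤ q.2) &&
                    decide (q.2 < (m : Int)) && !(vget v' q.1 q.2))
        dfsA grid n m fuel (push.reverse ++ rest) v' (vol + cellVal grid i j)

def solve (grid : List (List Int)) : Int :=
  let n := grid.length
  let m := ((PySem.List.pyGet? grid 0).getD []).length
  let fin := (List.range n).foldl (fun st (i : Nat) =>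
    (List.range m).foldl (fun st (j : Nat) =>
      if vget st.1 (i : Int) (j : Int) then st
      else
        let r := dfsA grid n m (5 * n * m + 1) [((i : Int), (j : Int))] st.1 0
        (r.1, max st.2 r.2)) st)
    (List.replicate n (List.replicate m false), 0)
  fin.2

-- ===== PORT B =====
def nbrs (p : Int × Int) : List (Int × Int) :=
  [(p.1 - 1, p.2), (p.1 + 1, p.2), (p.1, p.2 - 1), (p.1, p.2 + 1)]

def goodB (grid : List (List Int)) (n m : Nat) (q : Int × Int) : Bool :=
  decide (0 ≤ q.1) && decide (q.1 < (n : Int)) && decide (0 ≤ q.2) && decide (q.2 < (m : Int)) &&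
    !(cellVal grid q.1 q.2 == 0)

-- one frontier cell: scan its four neighbours, adding new nonzero in-range cells to comp and nf
def stepB (grid : List (List Int)) (n m : Nat)
    (st : PySem.Set (Int × Int) × PySem.Set (Int × Int)) (a : Int × Int) :
    PySem.Set (Int × Int) × PySem.Set (Int × Int) :=
  (nbrs a).foldl
    (fun st q =>
      if goodB grid n m q && !(PySem.Set.contains st.1 q) then
        (PySem.Set.add st.1 q, PySem.Set.add st.2 q)
      else st) st

-- one BFS round over the whole frontier
def roundB (grid : List (List Int)) (n m : Nat)
    (comp frontier : PySem.Set (Int × Int)) :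
    PySem.Set (Int × Int) × PySem.Set (Int × Int) :=
  frontier.foldl (stepB grid n m) (comp, PySem.Set.empty)

-- the 'while frontier' loop; fuel only makes it total — with the fuel solve_alt supplies,
-- the frontier always empties first
def loopB (grid : List (List Int)) (n m : Nat) :
    Nat → PySem.Set (Int × Int) → PySem.Set (Int × Int) → PySem.Set (Int × Int)
  | 0, comp, _ => comp
  | fuel + 1, comp, frontier =>
    if frontier.isEmpty then comp
    else
      let r := roundB grid n m comp frontier
      loopB grid n m fuel r.1 r.2

def solve_alt (grid : List (List Int)) : Int :=
  let n := grid.length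
  let m := ((PySem.List.pyGet? grid 0).getD []).length
  let fin := (List.range n).foldl (fun st (i : Nat) =>
    (List.range m).foldl (fun st (j : Nat) =>
      if !(cellVal grid (i : Int) (j : Int) == 0) &&
         !(PySem.Set.contains st.1 ((i : Int), (j : Int))) then
        let comp := loopB grid n m (n * m + 2)
          (PySem.Set.ofList [((i : Int), (j : Int))]) (PySem.Set.ofList [((i : Int), (j : Int))])
        (PySem.Set.union st.1 comp,
         max st.2 ((comp.map (fun p => cellVal grid p.1 p.2)).sum))
      else st) st)
    (PySem.Set.empty, 0)
  fin.2

-- ===== PRECONDITION & SPEC =====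
-- Pre_: exactly the inputs on which Python A returns normally: grid[0] must exist, and every row
-- must have at least len(grid[0]) entries (a shorter row raises IndexError in both Pythons).
def Pre_solve (grid : List (List Int)) : Prop :=
  grid ≠ [] ∧ ∀ row ∈ grid, ((PySem.List.pyGet? grid 0).getD []).length ≤ row.length
instance (grid : List (List Int)) : Decidable (Pre_solve grid) := by unfold Pre_solve; infer_instance

def pvWitness_solve : List (List Int) := [[1, 0], [0, 2]]

def Spec_solve (grid : List (List Int)) (out : Int) : Prop := out = solve_alt grid
instance (grid : List (List Int)) (out : Int) : Decidable (Spec_solve grid out) := by unfold Spec_solve; infer_instance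

-- ===== CLAIM (what is proved, stated in full; the proofs are below) =====
def Claim_equal_solve : Prop := ∀ (grid : List (List Int)), Dom_solve grid → Pre_solve grid → Spec_solve grid (solve grid)

-- ===== LEMMAS AND PROOFS =====

-- ---- Python-indexing helpers ----
theorem pyGet?_nonneg {α : Type} (xs : List α) {i : Int} (h : 0 ≤ i) :
    PySem.List.pyGet? xs i = xs[i.toNat]? := by
  have hi : i = ((i.toNat : Nat) : Int) := (Int.toNat_of_nonneg h).symm
  conv_lhs => rw [hi]
  rw [PySem.List.pyGet?_natCast]

-- ---- the semantic layer: in-range cells, nonzero cells, adjacency, connectivity ----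
def inR (n m : Nat) (p : Int × Int) : Prop :=
  0 ≤ p.1 ∧ p.1 < (n : Int) ∧ 0 ≤ p.2 ∧ p.2 < (m : Int)

def NZc (grid : List (List Int)) (n m : Nat) (p : Int × Int) : Prop :=
  inR n m p ∧ cellVal grid p.1 p.2 ≠ 0

def EdgeC (grid : List (List Int)) (n m : Nat) (p q : Int × Int) : Prop :=
  NZc grid n m p ∧ NZc grid n m q ∧ q ∈ nbrs p

def Conn (grid : List (List Int)) (n m : Nat) : Int × Int → Int × Int → Prop :=
  Relation.ReflTransGen (EdgeC grid n m)

theorem mem_nbrs_symm {p q : Int × Int} (h : q ∈ nbrs p) : p ∈ nbrs q := by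
  obtain ⟨a, b⟩ := p; obtain ⟨c, d⟩ := q
  simp only [nbrs, List.mem_cons, List.not_mem_nil, or_false, Prod.ext_iff] at h ⊢
  omega

theorem edge_symm {grid : List (List Int)} {n m : Nat} {p q : Int × Int}
    (h : EdgeC grid n m p q) : EdgeC grid n m q p :=
  ⟨h.2.1, h.1, mem_nbrs_symm h.2.2⟩

theorem conn_symm {grid : List (List Int)} {n m : Nat} {p q : Int × Int}
    (h : Conn grid n m p q) : Conn grid n m q p :=
  Relation.ReflTransGen.symmetric (fun _ _ e => edge_symm e) h

theorem conn_nz {grid : List (List Int)} {n m : Nat} {p q : Int × Int}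
    (h : Conn grid n m p q) (hp : NZc grid n m p) : NZc grid n m q := by
  induction h with
  | refl => exact hp
  | tail _ e _ => exact e.2.1

-- the in-range cells, as a duplicate-free list
def cellsList (n m : Nat) : List (Int × Int) :=
  ((List.range n).product (List.range m)).map (fun ij => (((ij.1 : Nat) : Int), ((ij.2 : Nat) : Int)))

theorem mem_cellsList {n m : Nat} {p : Int × Int} : p ∈ cellsList n m ↔ inR n m p := by
  obtain ⟨a, b⟩ := p
  simp only [cellsList, List.mem_map, inR]
  constructor
  · rintro ⟨⟨i, j⟩, hmem, heq⟩
    rw [List.pair_mem_product] at hmem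
    simp only [List.mem_range] at hmem
    obtain ⟨rfl, rfl⟩ : ((i : Int) = a ∧ (j : Int) = b) := by
      simpa [Prod.ext_iff] using heq
    refine ⟨by positivity, by exact_mod_cast hmem.1, by positivity, by exact_mod_cast hmem.2⟩
  · rintro ⟨h1, h2, h3, h4⟩
    refine ⟨(a.toNat, b.toNat), ?_, ?_⟩
    · rw [List.pair_mem_product]; simp only [List.mem_range]; omega
    · simp [Prod.ext_iff]; omega

theorem nodup_cellsList (n m : Nat) : (cellsList n m).Nodup := by
  refine List.Nodup.map ?_ (List.Nodup.product List.nodup_range List.nodup_range)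
  intro x y h
  simp only [Prod.mk.injEq] at h
  exact Prod.ext (by exact_mod_cast h.1) (by exact_mod_cast h.2)

theorem length_cellsList (n m : Nat) : (cellsList n m).length = n * m := by
  simp [cellsList, List.product, List.length_flatMap]

-- the component of a start cell, as a duplicate-free list, and its sum
noncomputable def compList (grid : List (List Int)) (n m : Nat) (c : Int × Int) : List (Int × Int) :=
  (cellsList n m).filter (fun d => @decide (Conn grid n m c d) (Classical.propDecidable _))

theorem mem_compList {grid : List (List Int)} {n m : Nat} {c d : Int × Int}
    (hc : NZc grid n m c) : d ∈ compList grid n m c ↔ Conn grid n m c d := by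
  simp only [compList, List.mem_filter, mem_cellsList, decide_eq_true_eq]
  exact ⟨fun h => h.2, fun h => ⟨(conn_nz h hc).1, h⟩⟩

theorem nodup_compList (grid : List (List Int)) (n m : Nat) (c : Int × Int) :
    (compList grid n m c).Nodup := (nodup_cellsList n m).filter _

noncomputable def compSum (grid : List (List Int)) (n m : Nat) (c : Int × Int) : Int :=
  ((compList grid n m c).map (fun p => cellVal grid p.1 p.2)).sum

theorem sum_eq_compSum {grid : List (List Int)} {n m : Nat} {c : Int × Int}
    (hc : NZc grid n m c) (L : List (Int × Int)) (hnd : L.Nodup)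
    (hmem : ∀ d, d ∈ L ↔ Conn grid n m c d) :
    (L.map (fun p => cellVal grid p.1 p.2)).sum = compSum grid n m c := by
  have hperm : L.Perm (compList grid n m c) := by
    refine (List.perm_ext_iff_of_nodup hnd (nodup_compList grid n m c)).mpr ?_
    intro a; rw [hmem a, mem_compList hc]
  exact List.Perm.sum_eq (hperm.map _)

-- ---- generic counting and paired-fold lemmas ----
theorem countP_lt_of {α : Type} {L : List α} {p q : α → Bool}
    (hmono : ∀ x ∈ L, q x = true → p x = true) {w : α} (hw : w ∈ L)
    (hpw : p w = true) (hqw : q w = false) : L.countP q < L.countP p := by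
  obtain ⟨l1, l2, rfl⟩ := List.append_of_mem hw
  have h1 : l1.countP q ≤ l1.countP p :=
    List.countP_mono_left (fun x hx => hmono x (by simp [hx]))
  have h2 : l2.countP q ≤ l2.countP p :=
    List.countP_mono_left (fun x hx => hmono x (by simp [hx]))
  simp [List.countP_append, List.countP_cons, hpw, hqw]
  omega

theorem foldl_rel {α β γ : Type} (R : α → β → Prop) (f : α → γ → α) (g : β → γ → β) :
    ∀ (l : List γ), (∀ x ∈ l, ∀ a b, R a b → R (f a x) (g b x)) →
      ∀ a b, R a b → R (l.foldl f a) (l.foldl g b) := by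
  intro l
  induction l with
  | nil => intro _ a b h; exact h
  | cons x t ih =>
    intro hstep a b h
    exact ih (fun y hy => hstep y (List.mem_cons_of_mem _ hy)) _ _
      (hstep x (List.mem_cons_self) a b h)

-- ---- the visited matrix, viewed as a set of in-range cells ----
def VShape (n m : Nat) (v : List (List Bool)) : Prop :=
  v.length = n ∧ ∀ r ∈ v, r.length = m

theorem vshape_replicate (n m : Nat) : VShape n m (List.replicate n (List.replicate m false)) := by
  constructor
  · simp
  · intro r hr; rw [List.eq_of_mem_replicate hr]; simp

theorem vget_eq {v : List (List Bool)} {i j : Int} (h1 : 0 ≤ i) (h3 : 0 ≤ j) :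
    vget v i j = ((v[i.toNat]?.getD [])[j.toNat]?).getD false := by
  simp [vget, pyGet?_nonneg _ h1, pyGet?_nonneg _ h3]

theorem vset_eq {v : List (List Bool)} {i j : Int} (h1 : 0 ≤ i) (h3 : 0 ≤ j) :
    vset v i j = v.set i.toNat ((v[i.toNat]?.getD []).set j.toNat true) := by
  simp [vset, PySem.List.pySetD_of_nonneg _ _ h1, PySem.List.pySetD_of_nonneg _ _ h3,
    pyGet?_nonneg _ h1]

theorem vget_replicate {n m : Nat} {p : Int × Int} (hp : inR n m p) :
    vget (List.replicate n (List.replicate m false)) p.1 p.2 = false := by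
  obtain ⟨h1, h2, h3, h4⟩ := hp
  rw [vget_eq h1 h3]
  simp only [List.getElem?_replicate]
  split_ifs <;> simp [List.getElem?_replicate] <;> split_ifs <;> rfl

theorem vshape_vset {n m : Nat} {v : List (List Bool)} {i j : Int}
    (hsh : VShape n m v) (hij : inR n m (i, j)) : VShape n m (vset v i j) := by
  obtain ⟨h1, h2, h3, h4⟩ := hij
  rw [vset_eq h1 h3]
  refine ⟨by simpa using hsh.1, ?_⟩
  intro r hr
  have hvl : v.length = n := hsh.1
  rcases List.mem_or_eq_of_mem_set hr with h | rfl
  · exact hsh.2 _ h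
  · rw [List.length_set]
    have hlt : i.toNat < v.length := by omega
    have : v[i.toNat]?.getD [] = v[i.toNat] := by simp [List.getElem?_eq_getElem hlt]
    rw [this]
    exact hsh.2 _ (List.getElem_mem hlt)

theorem vget_vset_self {n m : Nat} {v : List (List Bool)} {i j : Int}
    (hsh : VShape n m v) (hij : inR n m (i, j)) : vget (vset v i j) i j = true := by
  obtain ⟨h1, h2, h3, h4⟩ := hij
  rw [vget_eq h1 h3, vset_eq h1 h3]
  have hvl : v.length = n := hsh.1
  have hlt : i.toNat < v.length := by omega
  have hjl : j.toNat < (v[i.toNat]?.getD []).length := by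
    have : v[i.toNat]?.getD [] = v[i.toNat] := by simp [List.getElem?_eq_getElem hlt]
    rw [this, hsh.2 _ (List.getElem_mem hlt)]
    omega
  rw [List.getElem?_set_self (by simpa using hlt)]
  simp [List.getElem?_set_self hjl]

theorem vget_vset_of_ne {n m : Nat} {v : List (List Bool)} {i j x y : Int}
    (hsh : VShape n m v) (hij : inR n m (i, j)) (hxy : inR n m (x, y))
    (hne : (x, y) ≠ (i, j)) : vget (vset v i j) x y = vget v x y := by
  obtain ⟨h1, h2, h3, h4⟩ := hij
  obtain ⟨g1, g2, g3, g4⟩ := hxy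
  rw [vget_eq g1 g3, vget_eq g1 g3, vset_eq h1 h3]
  have hvl : v.length = n := hsh.1
  by_cases hx : x.toNat = i.toNat
  · have hxi : x = i := by omega
    have hy : y.toNat ≠ j.toNat := by
      intro hc
      exact hne (by simp [Prod.ext_iff]; omega)
    have hlt : i.toNat < v.length := by omega
    rw [hx, List.getElem?_set_self (by simpa using hlt)]
    simp only [Option.getD_some]
    rw [List.getElem?_set_ne (by omega)]
  · rw [List.getElem?_set_ne (by omega)]

-- number of in-range unvisited cells (termination measure of the dfs loop)
def unvis (n m : Nat) (v : List (List Bool)) : Nat :=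
  (cellsList n m).countP (fun p => !vget v p.1 p.2)

theorem unvis_le (n m : Nat) (v : List (List Bool)) : unvis n m v ≤ n * m := by
  rw [← length_cellsList n m]; exact List.countP_le_length

theorem unvis_vset_lt {n m : Nat} {v : List (List Bool)} {i j : Int}
    (hsh : VShape n m v) (hij : inR n m (i, j)) (h : vget v i j = false) :
    unvis n m (vset v i j) < unvis n m v := by
  unfold unvis
  have hmono : ∀ x ∈ cellsList n m,
      (fun p : Int × Int => !vget (vset v i j) p.1 p.2) x = true →
      (fun p : Int × Int => !vget v p.1 p.2) x = true := by
    intro x hx hq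
    have hxr : inR n m (x.1, x.2) := by obtain ⟨a, b⟩ := x; exact mem_cellsList.mp hx
    simp only [Bool.not_eq_true'] at hq ⊢
    by_cases hcs : (x.1, x.2) = (i, j)
    · rw [show x = (x.1, x.2) from rfl, hcs, vget_vset_self hsh hij] at hq
      exact absurd hq (by simp)
    · rw [show x = (x.1, x.2) from rfl] at hq ⊢
      rwa [vget_vset_of_ne hsh hij hxr hcs] at hq
  have hp : (fun p : Int × Int => !vget v p.1 p.2) (i, j) = true := by simp [h]
  have hq : (fun p : Int × Int => !vget (vset v i j) p.1 p.2) (i, j) = false := by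
    simp [vget_vset_self hsh hij]
  exact countP_lt_of hmono (mem_cellsList.mpr hij) hp hq

-- a set that contains c and is closed under edges contains the whole component
theorem conn_mem_of_closed {grid : List (List Int)} {n m : Nat} {c : Int × Int}
    {S : List (Int × Int)} (hcm : c ∈ S)
    (hcl : ∀ a ∈ S, ∀ q, EdgeC grid n m a q → q ∈ S) :
    ∀ q, Conn grid n m c q → q ∈ S := by
  intro q h
  induction h with
  | refl => exact hcm
  | tail _ e ih => exact hcl _ ih _ e

-- ---- the DFS loop of A computes exactly the component of its start cell ----
theorem dfsA_run (grid : List (List Int)) (n m : Nat) (c : Int × Int)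
    (hc : NZc grid n m c) (V0 : List (List Bool))
    (hV0 : ∀ p, Conn grid n m c p → vget V0 p.1 p.2 = false) :
    ∀ fuel (stack : List (Int × Int)) v vol (M : List (Int × Int)),
      VShape n m v →
      (∀ p, inR n m p → (vget v p.1 p.2 = true ↔ vget V0 p.1 p.2 = true ∨ p ∈ M)) →
      M.Nodup →
      (∀ p ∈ M, inR n m p ∧ (Conn grid n m c p ∨ cellVal grid p.1 p.2 = 0)) →
      (∀ p ∈ stack, inR n m p ∧ (Conn grid n m c p ∨ cellVal grid p.1 p.2 = 0)) →
      (∀ a ∈ M, ∀ q, EdgeC grid n m a q → q ∈ M ∨ q ∈ stack) →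
      (c ∈ M ∨ c ∈ stack) →
      vol = ((M.filter (fun d => !(cellVal grid d.1 d.2 == 0))).map (fun p => cellVal grid p.1 p.2)).sum →
      5 * unvis n m v + stack.length ≤ fuel →
      ∃ M', M ⊆ M' ∧ M'.Nodup ∧
        VShape n m (dfsA grid n m fuel stack v vol).1 ∧
        (∀ p, inR n m p →
          (vget (dfsA grid n m fuel stack v vol).1 p.1 p.2 = true ↔ vget V0 p.1 p.2 = true ∨ p ∈ M')) ∧
        (∀ p ∈ M', inR n m p ∧ (Conn grid n m c p ∨ cellVal grid p.1 p.2 = 0)) ∧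
        (∀ q, Conn grid n m c q → q ∈ M') ∧
        (dfsA grid n m fuel stack v vol).2 =
          ((M'.filter (fun d => !(cellVal grid d.1 d.2 == 0))).map (fun p => cellVal grid p.1 p.2)).sum := by
  intro fuel
  induction fuel with
  | zero =>
    intro stack v vol M hsh hview hnd hM hstack hfront hcs hvol hfuel
    have hnil : stack = [] := by
      cases stack with
      | nil => rfl
      | cons a t => simp at hfuel
    subst hnil
    have hcM : c ∈ M := by
      rcases hcs with h | h
      · exact h
      · exact absurd h List.not_mem_nil
    have hclosed : ∀ a ∈ M, ∀ q, EdgeC grid n m a q → q ∈ M := by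
      intro a ha q e
      rcases hfront a ha q e with h | h
      · exact h
      · exact absurd h List.not_mem_nil
    exact ⟨M, fun x hx => hx, hnd, hsh, hview, hM, conn_mem_of_closed hcM hclosed, hvol⟩
  | succ fuel ih =>
    intro stack v vol M hsh hview hnd hM hstack hfront hcs hvol hfuel
    cases stack with
    | nil =>
      have hcM : c ∈ M := by
        rcases hcs with h | h
        · exact h
        · exact absurd h List.not_mem_nil
      have hclosed : ∀ a ∈ M, ∀ q, EdgeC grid n m a q → q ∈ M := by
        intro a ha q e
        rcases hfront a ha q e with h | h
        · exact h
        · exact absurd h List.not_mem_nil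
      exact ⟨M, fun x hx => hx, hnd, hsh, hview, hM, conn_mem_of_closed hcM hclosed, hvol⟩
    | cons p rest =>
      obtain ⟨i, j⟩ := p
      obtain ⟨hij, hijC⟩ := hstack (i, j) List.mem_cons_self
      -- an NZ target of an edge out of a component member is itself in the component
      have hedge_conn : ∀ a ∈ M, ∀ q, EdgeC grid n m a q → Conn grid n m c q := by
        intro a ha q e
        have hca : Conn grid n m c a := by
          rcases (hM a ha).2 with h | h
          · exact h
          · exact absurd e.1.2 (by simp [h])
        exact Relation.ReflTransGen.tail hca e
      by_cases hv : vget v i j = true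
      · -- already visited: pop and continue
        rw [show dfsA grid n m (fuel + 1) ((i, j) :: rest) v vol
            = dfsA grid n m fuel rest v vol by simp [dfsA, hv]]
        refine ih rest v vol M hsh hview hnd hM
          (fun q hq => hstack q (List.mem_cons_of_mem _ hq)) (fun a ha q e => ?_) ?_ hvol (by simp at hfuel ⊢; omega)
        · rcases hfront a ha q e with h | h
          · exact Or.inl h
          · rcases List.mem_cons.mp h with h' | h'
            · -- the popped cell is already recorded in M
              left
              have hcq : Conn grid n m c q := hedge_conn a ha q e
              have hqr : inR n m q := (conn_nz hcq hc).1
              have := (hview q hqr).mp (by rw [h']; exact hv)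
              rcases this with h0 | hM'
              · exact absurd h0 (by simp [hV0 q hcq])
              · exact hM'
            · exact Or.inr h'
        · rcases hcs with h | h
          · exact Or.inl h
          · rcases List.mem_cons.mp h with h' | h'
            · left
              have := (hview c hc.1).mp (by rw [h']; exact hv)
              rcases this with h0 | hM'
              · exact absurd h0 (by simp [hV0 c Relation.ReflTransGen.refl])
              · exact hM'
            · exact Or.inr h'
      · -- fresh cell: mark it
        have hv' : vget v i j = false := by simpa using hv
        have hsh' : VShape n m (vset v i j) := vshape_vset hsh hij
        have hpM : (i, j) ∉ M := by
          intro h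
          have := (hview (i, j) hij).mpr (Or.inr h)
          simp [hv'] at this
        have hlt : unvis n m (vset v i j) < unvis n m v := unvis_vset_lt hsh hij hv'
        have hview' : ∀ x, inR n m x →
            (vget (vset v i j) x.1 x.2 = true ↔ vget V0 x.1 x.2 = true ∨ x ∈ (i, j) :: M) := by
          intro x hx
          by_cases hxp : x = (i, j)
          · subst hxp
            simp [vget_vset_self hsh hij]
          · have : vget (vset v i j) x.1 x.2 = vget v x.1 x.2 := by
              obtain ⟨a, b⟩ := x
              exact vget_vset_of_ne hsh hij hx hxp
            rw [this, hview x hx, List.mem_cons]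
            constructor
            · rintro (h | h)
              · exact Or.inl h
              · exact Or.inr (Or.inr h)
            · rintro (h | rfl | h)
              · exact Or.inl h
              · exact absurd rfl hxp
              · exact Or.inr h
        by_cases hz : cellVal grid i j = 0
        · -- a zero cell: mark it and move on, the volume is unchanged
          rw [show dfsA grid n m (fuel + 1) ((i, j) :: rest) v vol
              = dfsA grid n m fuel rest (vset v i j) vol by simp [dfsA, hv', hz]]
          obtain ⟨M', hsubM, rest'⟩ := ih rest (vset v i j) vol ((i, j) :: M) hsh' hview'
            (List.nodup_cons.mpr ⟨hpM, hnd⟩)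
            (by
              intro x hx
              rcases List.mem_cons.mp hx with rfl | hx
              · exact ⟨hij, Or.inr hz⟩
              · exact hM x hx)
            (fun q hq => hstack q (List.mem_cons_of_mem _ hq))
            (by
              intro a ha q e
              rcases List.mem_cons.mp ha with rfl | ha
              · exact absurd e.1.2 (by simp [hz])
              · rcases hfront a ha q e with h | h
                · exact Or.inl (List.mem_cons_of_mem _ h)
                · rcases List.mem_cons.mp h with h' | h'
                  · exact Or.inl (h' ▸ List.mem_cons_self)
                  · exact Or.inr h')
            (by
              rcases hcs with h | h
              · exact Or.inl (List.mem_cons_of_mem _ h)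
              · rcases List.mem_cons.mp h with h' | h'
                · exact absurd (h' ▸ hc.2) (by simp [hz])
                · exact Or.inr h')
            (by
              rw [hvol]
              have : ((i, j) :: M).filter (fun d => !(cellVal grid d.1 d.2 == 0))
                  = M.filter (fun d => !(cellVal grid d.1 d.2 == 0)) := by
                rw [List.filter_cons_of_neg (by simp [hz])]
              rw [this])
            (by simp at hfuel ⊢; omega)
          exact ⟨M', fun x hx => hsubM (List.mem_cons_of_mem _ hx), rest'⟩
        · -- a nonzero cell: count it and push its unvisited neighbours
          have hpC : Conn grid n m c (i, j) := by
            rcases hijC with h | h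
            · exact h
            · exact absurd h hz
          have hpNZ : NZc grid n m (i, j) := ⟨hij, hz⟩
          rw [show dfsA grid n m (fuel + 1) ((i, j) :: rest) v vol
              = dfsA grid n m fuel
                ((([(i - 1, j), (i + 1, j), (i, j - 1), (i, j + 1)] : List (Int × Int)).filter
                  (fun q => decide (0 ≤ q.1) && decide (q.1 < (n : Int)) && decide (0 ≤ q.2) &&
                    decide (q.2 < (m : Int)) && !(vget (vset v i j) q.1 q.2))).reverse ++ rest)
                (vset v i j) (vol + cellVal grid i j) by simp [dfsA, hv', hz]]
          set push := (([(i - 1, j), (i + 1, j), (i, j - 1), (i, j + 1)] : List (Int × Int)).filter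
            (fun q => decide (0 ≤ q.1) && decide (q.1 < (n : Int)) && decide (0 ≤ q.2) &&
              decide (q.2 < (m : Int)) && !(vget (vset v i j) q.1 q.2))) with hpush
          have hmem_push : ∀ q, q ∈ push ↔
              (q ∈ nbrs (i, j) ∧ inR n m q ∧ vget (vset v i j) q.1 q.2 = false) := by
            intro q
            rw [hpush, List.mem_filter]
            constructor
            · rintro ⟨hq4, hcond⟩
              simp only [Bool.and_eq_true, decide_eq_true_eq, Bool.not_eq_true'] at hcond
              exact ⟨hq4, ⟨hcond.1.1.1.1, hcond.1.1.1.2, hcond.1.1.2, hcond.1.2⟩, hcond.2⟩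
            · rintro ⟨hq4, ⟨g1, g2, g3, g4⟩, hvq⟩
              refine ⟨hq4, ?_⟩
              simp only [Bool.and_eq_true, decide_eq_true_eq, Bool.not_eq_true']
              exact ⟨⟨⟨⟨g1, g2⟩, g3⟩, g4⟩, hvq⟩
          obtain ⟨M', hsubM, rest'⟩ := ih (push.reverse ++ rest) (vset v i j)
            (vol + cellVal grid i j) ((i, j) :: M) hsh' hview'
            (List.nodup_cons.mpr ⟨hpM, hnd⟩)
            (by
              intro x hx
              rcases List.mem_cons.mp hx with rfl | hx
              · exact ⟨hij, Or.inl hpC⟩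
              · exact hM x hx)
            (by
              intro q hq
              rcases List.mem_append.mp hq with h | h
              · obtain ⟨hq4, hqr, _⟩ := (hmem_push q).mp (List.mem_reverse.mp h)
                refine ⟨hqr, ?_⟩
                by_cases hqz : cellVal grid q.1 q.2 = 0
                · exact Or.inr hqz
                · exact Or.inl (Relation.ReflTransGen.tail hpC ⟨hpNZ, ⟨hqr, hqz⟩, hq4⟩)
              · exact hstack q (List.mem_cons_of_mem _ h))
            (by
              intro a ha q e
              rcases List.mem_cons.mp ha with rfl | ha
              · -- edges out of the newly marked cell
                have hq4 : q ∈ nbrs (i, j) := e.2.2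
                have hqr : inR n m q := e.2.1.1
                by_cases hvq : vget (vset v i j) q.1 q.2 = true
                · left
                  have hcq : Conn grid n m c q := Relation.ReflTransGen.tail hpC e
                  rcases (hview' q hqr).mp hvq with h0 | hM'
                  · exact absurd h0 (by simp [hV0 q hcq])
                  · exact hM'
                · right
                  exact List.mem_append.mpr (Or.inl (List.mem_reverse.mpr
                    ((hmem_push q).mpr ⟨hq4, hqr, by simpa using hvq⟩)))
              · rcases hfront a ha q e with h | h
                · exact Or.inl (List.mem_cons_of_mem _ h)
                · rcases List.mem_cons.mp h with h' | h'
                  · exact Or.inl (h' ▸ List.mem_cons_self)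
                  · exact Or.inr (List.mem_append.mpr (Or.inr h')))
            (by
              rcases hcs with h | h
              · exact Or.inl (List.mem_cons_of_mem _ h)
              · rcases List.mem_cons.mp h with h' | h'
                · exact Or.inl (h' ▸ List.mem_cons_self)
                · exact Or.inr (List.mem_append.mpr (Or.inr h')))
            (by
              rw [List.filter_cons_of_pos (by simp [hz]), List.map_cons, List.sum_cons, hvol]
              dsimp only
              omega)
            (by
              have h4 : push.length ≤ 4 := by
                calc push.length ≤ ([(i - 1, j), (i + 1, j), (i, j - 1), (i, j + 1)] :
                    List (Int × Int)).length := by rw [hpush]; exact List.length_filter_le _ _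
                _ = 4 := rfl
              simp only [List.length_append, List.length_reverse, List.length_cons] at hfuel ⊢
              omega)
          exact ⟨M', fun x hx => hsubM (List.mem_cons_of_mem _ hx), rest'⟩

-- a dfs started on an unvisited zero cell just marks it and returns 0 volume
theorem dfsA_zero_start (grid : List (List Int)) (n m : Nat) (fuel : Nat) (i j : Int)
    (v : List (List Bool)) (vol : Int) (hv : vget v i j = false) (hz : cellVal grid i j = 0) :
    dfsA grid n m (fuel + 1) [(i, j)] v vol = (vset v i j, vol) := by
  simp [dfsA, hv, hz]

-- ---- the BFS round of B adds exactly the fresh good neighbours of the frontier ----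
theorem stepFold_mem (grid : List (List Int)) (n m : Nat) :
    ∀ (ns : List (Int × Int)) (comp nf : PySem.Set (Int × Int)), comp.Nodup → nf.Nodup →
      ((ns.foldl (fun st q =>
          if goodB grid n m q && !(PySem.Set.contains st.1 q) then
            (PySem.Set.add st.1 q, PySem.Set.add st.2 q)
          else st) (comp, nf)).1.Nodup ∧
       (ns.foldl (fun st q =>
          if goodB grid n m q && !(PySem.Set.contains st.1 q) then
            (PySem.Set.add st.1 q, PySem.Set.add st.2 q)
          else st) (comp, nf)).2.Nodup ∧
       (∀ q, q ∈ (ns.foldl (fun st q =>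
          if goodB grid n m q && !(PySem.Set.contains st.1 q) then
            (PySem.Set.add st.1 q, PySem.Set.add st.2 q)
          else st) (comp, nf)).1 ↔ q ∈ comp ∨ (q ∈ ns ∧ goodB grid n m q = true)) ∧
       (∀ q, q ∈ (ns.foldl (fun st q =>
          if goodB grid n m q && !(PySem.Set.contains st.1 q) then
            (PySem.Set.add st.1 q, PySem.Set.add st.2 q)
          else st) (comp, nf)).2 ↔ q ∈ nf ∨ (q ∈ ns ∧ goodB grid n m q = true ∧ q ∉ comp))) := by
  intro ns
  induction ns with
  | nil => intro comp nf hc hn; exact ⟨hc, hn, fun q => by simp, fun q => by simp⟩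
  | cons w t ih =>
    intro comp nf hc hn
    simp only [List.foldl_cons]
    by_cases hg : goodB grid n m w = true
    · by_cases hm : w ∈ comp
      · rw [if_neg (by simp [hg, hm])]
        obtain ⟨N1, N2, H1, H2⟩ := ih comp nf hc hn
        refine ⟨N1, N2, fun q => ?_, fun q => ?_⟩
        · rw [H1 q]; constructor
          · rintro (h | h) <;> [exact Or.inl h; exact Or.inr ⟨List.mem_cons_of_mem _ h.1, h.2⟩]
          · rintro (h | ⟨hq, hgq⟩)
            · exact Or.inl h
            · rcases List.mem_cons.mp hq with rfl | hq
              · exact Or.inl hm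
              · exact Or.inr ⟨hq, hgq⟩
        · rw [H2 q]; constructor
          · rintro (h | h) <;> [exact Or.inl h; exact Or.inr ⟨List.mem_cons_of_mem _ h.1, h.2.1, h.2.2⟩]
          · rintro (h | ⟨hq, hgq, hnc⟩)
            · exact Or.inl h
            · rcases List.mem_cons.mp hq with rfl | hq
              · exact absurd hm hnc
              · exact Or.inr ⟨hq, hgq, hnc⟩
      · rw [if_pos (by simp [hg, hm])]
        obtain ⟨N1, N2, H1, H2⟩ := ih (PySem.Set.add comp w) (PySem.Set.add nf w)
          (PySem.Set.nodup_add comp w hc) (PySem.Set.nodup_add nf w hn)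
        refine ⟨N1, N2, fun q => ?_, fun q => ?_⟩
        · rw [H1 q, PySem.Set.mem_add]; constructor
          · rintro ((h | rfl) | h)
            · exact Or.inl h
            · exact Or.inr ⟨List.mem_cons_self, hg⟩
            · exact Or.inr ⟨List.mem_cons_of_mem _ h.1, h.2⟩
          · rintro (h | ⟨hq, hgq⟩)
            · exact Or.inl (Or.inl h)
            · rcases List.mem_cons.mp hq with rfl | hq
              · exact Or.inl (Or.inr rfl)
              · exact Or.inr ⟨hq, hgq⟩
        · rw [H2 q, PySem.Set.mem_add]; constructor
          · rintro ((h | rfl) | h)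
            · exact Or.inl h
            · exact Or.inr ⟨List.mem_cons_self, hg, hm⟩
            · refine Or.inr ⟨List.mem_cons_of_mem _ h.1, h.2.1, fun hqc => ?_⟩
              exact h.2.2 ((PySem.Set.mem_add comp w q).mpr (Or.inl hqc))
          · rintro (h | ⟨hq, hgq, hnc⟩)
            · exact Or.inl (Or.inl h)
            · rcases List.mem_cons.mp hq with rfl | hq
              · exact Or.inl (Or.inr rfl)
              · by_cases hqw : q = w
                · exact Or.inl (Or.inr hqw)
                · refine Or.inr ⟨hq, hgq, fun hqc => ?_⟩
                  rcases (PySem.Set.mem_add comp w q).mp hqc with h' | h'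
                  · exact hnc h'
                  · exact hqw h'
    · rw [if_neg (by simp [hg])]
      obtain ⟨N1, N2, H1, H2⟩ := ih comp nf hc hn
      refine ⟨N1, N2, fun q => ?_, fun q => ?_⟩
      · rw [H1 q]; constructor
        · rintro (h | h) <;> [exact Or.inl h; exact Or.inr ⟨List.mem_cons_of_mem _ h.1, h.2⟩]
        · rintro (h | ⟨hq, hgq⟩)
          · exact Or.inl h
          · rcases List.mem_cons.mp hq with rfl | hq
            · exact absurd hgq hg
            · exact Or.inr ⟨hq, hgq⟩
      · rw [H2 q]; constructor
        · rintro (h | h) <;> [exact Or.inl h; exact Or.inr ⟨List.mem_cons_of_mem _ h.1, h.2.1, h.2.2⟩]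
        · rintro (h | ⟨hq, hgq, hnc⟩)
          · exact Or.inl h
          · rcases List.mem_cons.mp hq with rfl | hq
            · exact absurd hgq hg
            · exact Or.inr ⟨hq, hgq, hnc⟩

theorem stepB_mem (grid : List (List Int)) (n m : Nat) (a : Int × Int)
    (comp nf : PySem.Set (Int × Int)) (hcn : comp.Nodup) (hnn : nf.Nodup) :
    (stepB grid n m (comp, nf) a).1.Nodup ∧ (stepB grid n m (comp, nf) a).2.Nodup ∧
    (∀ q, q ∈ (stepB grid n m (comp, nf) a).1 ↔
      q ∈ comp ∨ (q ∈ nbrs a ∧ goodB grid n m q = true)) ∧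
    (∀ q, q ∈ (stepB grid n m (comp, nf) a).2 ↔
      q ∈ nf ∨ (q ∈ nbrs a ∧ goodB grid n m q = true ∧ q ∉ comp)) := by
  exact stepFold_mem grid n m (nbrs a) comp nf hcn hnn

theorem roundFold_mem (grid : List (List Int)) (n m : Nat) :
    ∀ (fr : List (Int × Int)) (comp nf : PySem.Set (Int × Int)), comp.Nodup → nf.Nodup →
      ((fr.foldl (stepB grid n m) (comp, nf)).1.Nodup ∧
       (fr.foldl (stepB grid n m) (comp, nf)).2.Nodup ∧
       (∀ q, q ∈ (fr.foldl (stepB grid n m) (comp, nf)).1 ↔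
         q ∈ comp ∨ (goodB grid n m q = true ∧ ∃ a ∈ fr, q ∈ nbrs a)) ∧
       (∀ q, q ∈ (fr.foldl (stepB grid n m) (comp, nf)).2 ↔
         q ∈ nf ∨ (goodB grid n m q = true ∧ q ∉ comp ∧ ∃ a ∈ fr, q ∈ nbrs a))) := by
  intro fr
  induction fr with
  | nil => intro comp nf hc hn; exact ⟨hc, hn, fun q => by simp, fun q => by simp⟩
  | cons a t ih =>
    intro comp nf hc hn
    obtain ⟨S1, S2, SH1, SH2⟩ := stepB_mem grid n m a comp nf hc hn
    simp only [List.foldl_cons]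
    rw [show stepB grid n m (comp, nf) a =
      ((stepB grid n m (comp, nf) a).1, (stepB grid n m (comp, nf) a).2) from rfl]
    obtain ⟨N1, N2, H1, H2⟩ := ih (stepB grid n m (comp, nf) a).1 (stepB grid n m (comp, nf) a).2 S1 S2
    refine ⟨N1, N2, fun q => ?_, fun q => ?_⟩
    · rw [H1 q, SH1 q]
      simp only [List.mem_cons]
      constructor
      · rintro ((h | ⟨hn1, hg⟩) | ⟨hg, b, hb, hnb⟩)
        · exact Or.inl h
        · exact Or.inr ⟨hg, a, Or.inl rfl, hn1⟩
        · exact Or.inr ⟨hg, b, Or.inr hb, hnb⟩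
      · rintro (h | ⟨hg, b, (rfl | hb), hnb⟩)
        · exact Or.inl (Or.inl h)
        · exact Or.inl (Or.inr ⟨hnb, hg⟩)
        · exact Or.inr ⟨hg, b, hb, hnb⟩
    · rw [H2 q, SH2 q]
      simp only [List.mem_cons]
      constructor
      · rintro ((h | ⟨hn1, hg, hnc⟩) | ⟨hg, hns, b, hb, hnb⟩)
        · exact Or.inl h
        · exact Or.inr ⟨hg, hnc, a, Or.inl rfl, hn1⟩
        · refine Or.inr ⟨hg, fun hqc => hns ((SH1 q).mpr (Or.inl hqc)), b, Or.inr hb, hnb⟩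
      · rintro (h | ⟨hg, hnc, b, (rfl | hb), hnb⟩)
        · exact Or.inl (Or.inl h)
        · exact Or.inl (Or.inr ⟨hnb, hg, hnc⟩)
        · by_cases hs : q ∈ (stepB grid n m (comp, nf) a).1
          · rcases (SH1 q).mp hs with h' | ⟨hn1, hg'⟩
            · exact absurd h' hnc
            · exact Or.inl (Or.inr ⟨hn1, hg', hnc⟩)
          · exact Or.inr ⟨hg, hs, b, hb, hnb⟩

theorem roundB_mem (grid : List (List Int)) (n m : Nat)
    (frontier comp : PySem.Set (Int × Int)) (hcn : comp.Nodup) :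
    (roundB grid n m comp frontier).1.Nodup ∧ (roundB grid n m comp frontier).2.Nodup ∧
    (∀ q, q ∈ (roundB grid n m comp frontier).1 ↔
      q ∈ comp ∨ (goodB grid n m q = true ∧ ∃ a ∈ frontier, q ∈ nbrs a)) ∧
    (∀ q, q ∈ (roundB grid n m comp frontier).2 ↔
      (goodB grid n m q = true ∧ q ∉ comp ∧ ∃ a ∈ frontier, q ∈ nbrs a)) := by
  obtain ⟨N1, N2, H1, H2⟩ := roundFold_mem grid n m frontier comp PySem.Set.empty hcn (by simp [PySem.Set.empty])
  refine ⟨N1, N2, H1, fun q => ?_⟩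
  rw [show roundB grid n m comp frontier = frontier.foldl (stepB grid n m) (comp, PySem.Set.empty) from rfl]
  rw [H2 q]
  simp [PySem.Set.empty]

theorem goodB_iff {grid : List (List Int)} {n m : Nat} {q : Int × Int} :
    goodB grid n m q = true ↔ NZc grid n m q := by
  simp [goodB, NZc, inR, and_assoc]

-- ---- the BFS loop of B computes exactly the component of its start cell ----
theorem loopB_nil (grid : List (List Int)) (n m : Nat) :
    ∀ fuel (comp : PySem.Set (Int × Int)), loopB grid n m fuel comp [] = comp := by
  intro fuel comp
  cases fuel <;> simp [loopB]

theorem loopB_run (grid : List (List Int)) (n m : Nat) (c : Int × Int) (hc : NZc grid n m c) :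
    ∀ fuel (comp frontier : PySem.Set (Int × Int)),
      comp.Nodup →
      (∀ q ∈ comp, Conn grid n m c q) →
      c ∈ comp →
      (∀ q ∈ frontier, q ∈ comp) →
      (∀ a ∈ comp, ∀ q, EdgeC grid n m a q → q ∈ comp ∨ a ∈ frontier) →
      (cellsList n m).countP (fun p => !(decide (p ∈ comp))) + 1 ≤ fuel →
      (loopB grid n m fuel comp frontier).Nodup ∧
        (∀ q, q ∈ loopB grid n m fuel comp frontier ↔ Conn grid n m c q) := by
  intro fuel
  induction fuel with
  | zero => intro comp frontier _ _ _ _ _ hfuel; omega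
  | succ fuel ih =>
    intro comp frontier hnd hsub hcm hfc hclosed hfuel
    by_cases hemp : frontier.isEmpty
    · rw [show loopB grid n m (fuel + 1) comp frontier = comp by simp [loopB, hemp]]
      have hfr : frontier = [] := List.isEmpty_iff.mp hemp
      subst hfr
      refine ⟨hnd, fun q => ⟨hsub q, ?_⟩⟩
      refine conn_mem_of_closed hcm (fun a ha q e => ?_) q
      rcases hclosed a ha q e with h | h
      · exact h
      · exact absurd h (List.not_mem_nil)
    · have hstep : loopB grid n m (fuel + 1) comp frontier =
          loopB grid n m fuel (roundB grid n m comp frontier).1 (roundB grid n m comp frontier).2 := by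
        simp [loopB, hemp]
      rw [hstep]
      obtain ⟨N1, N2, H1, H2⟩ := roundB_mem grid n m frontier comp hnd
      -- every member of the grown component is connected to c
      have hsub1 : ∀ q ∈ (roundB grid n m comp frontier).1, Conn grid n m c q := by
        intro q hq
        rcases (H1 q).mp hq with h | ⟨hg, a, ha, hnb⟩
        · exact hsub q h
        · have hca : Conn grid n m c a := hsub a (hfc a ha)
          exact Relation.ReflTransGen.tail hca ⟨conn_nz hca hc, goodB_iff.mp hg, hnb⟩
      have hmono : ∀ q ∈ comp, q ∈ (roundB grid n m comp frontier).1 :=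
        fun q h => (H1 q).mpr (Or.inl h)
      by_cases hr2 : (roundB grid n m comp frontier).2 = []
      · rw [hr2, loopB_nil]
        -- no new cell: comp is already closed
        have hsame : ∀ q, q ∈ (roundB grid n m comp frontier).1 ↔ q ∈ comp := by
          intro q
          refine ⟨fun h => ?_, fun h => hmono q h⟩
          rcases (H1 q).mp h with h | ⟨hg, a, ha, hnb⟩
          · exact h
          · by_contra hqc
            have : q ∈ (roundB grid n m comp frontier).2 := (H2 q).mpr ⟨hg, hqc, a, ha, hnb⟩
            rw [hr2] at this
            exact absurd this (List.not_mem_nil)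
        refine ⟨N1, fun q => ⟨hsub1 q, fun hconn => ?_⟩⟩
        refine conn_mem_of_closed ((hsame c).mpr hcm) (fun a ha q e => ?_) q hconn
        have ha' := (hsame a).mp ha
        rcases hclosed a ha' q e with h | h
        · exact (hsame q).mpr h
        · exact (H1 q).mpr (Or.inr ⟨goodB_iff.mpr e.2.1, a, h, e.2.2⟩)
      · -- a new cell was added: the unassigned count strictly drops
        obtain ⟨w, hw⟩ := List.exists_mem_of_ne_nil _ hr2
        obtain ⟨hgw, hwnc, a, ha, hnb⟩ := (H2 w).mp hw
        have hw1 : w ∈ (roundB grid n m comp frontier).1 := (H1 w).mpr (Or.inr ⟨hgw, a, ha, hnb⟩)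
        have hcount : (cellsList n m).countP
            (fun p => !(decide (p ∈ (roundB grid n m comp frontier).1))) <
            (cellsList n m).countP (fun p => !(decide (p ∈ comp))) := by
          refine countP_lt_of (fun x _ hx => ?_) (mem_cellsList.mpr (goodB_iff.mp hgw).1)
            (by simp [hwnc]) (by simp [hw1])
          simp only [Bool.not_eq_true', decide_eq_false_iff_not] at hx ⊢
          exact fun hxc => hx (hmono x hxc)
        refine ih (roundB grid n m comp frontier).1 (roundB grid n m comp frontier).2
          N1 hsub1 (hmono c hcm) (fun q hq => ?_) (fun a' ha' q e => ?_) (by omega)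
        · obtain ⟨hg, hnc, b, hb, hnbb⟩ := (H2 q).mp hq
          exact (H1 q).mpr (Or.inr ⟨hg, b, hb, hnbb⟩)
        · rcases (H1 a').mp ha' with h | hnew
          · rcases hclosed a' h q e with h' | h'
            · exact Or.inl (hmono q h')
            · exact Or.inl ((H1 q).mpr (Or.inr ⟨goodB_iff.mpr e.2.1, a', h', e.2.2⟩))
          · by_cases ha'c : a' ∈ comp
            · rcases hclosed a' ha'c q e with h' | h'
              · exact Or.inl (hmono q h')
              · exact Or.inl ((H1 q).mpr (Or.inr ⟨goodB_iff.mpr e.2.1, a', h', e.2.2⟩))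
            · exact Or.inr ((H2 a').mpr ⟨hnew.1, ha'c, hnew.2⟩)

-- ---- the outer double loops, coupled by a step-preserved relation ----
def RelAB (grid : List (List Int)) (n m : Nat)
    (sA : List (List Bool) × Int) (sB : PySem.Set (Int × Int) × Int) : Prop :=
  VShape n m sA.1 ∧ sA.2 = sB.2 ∧ 0 ≤ sA.2 ∧ sB.1.Nodup ∧
  (∀ p ∈ sB.1, NZc grid n m p) ∧
  (∀ p, NZc grid n m p → (vget sA.1 p.1 p.2 = true ↔ p ∈ sB.1)) ∧
  (∀ p ∈ sB.1, ∀ q, Conn grid n m p q → q ∈ sB.1)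

theorem cell_step (grid : List (List Int)) (n m : Nat) (i j : Int) (hij : inR n m (i, j))
    (sA : List (List Bool) × Int) (sB : PySem.Set (Int × Int) × Int)
    (h : RelAB grid n m sA sB) :
    RelAB grid n m
      (if vget sA.1 i j then sA
       else
         let r := dfsA grid n m (5 * n * m + 1) [(i, j)] sA.1 0
         (r.1, max sA.2 r.2))
      (if !(cellVal grid i j == 0) && !(PySem.Set.contains sB.1 (i, j)) then
         let comp := loopB grid n m (n * m + 2)
           (PySem.Set.ofList [(i, j)]) (PySem.Set.ofList [(i, j)])
         (PySem.Set.union sB.1 comp,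
          max sB.2 ((comp.map (fun p => cellVal grid p.1 p.2)).sum))
       else sB) := by
  obtain ⟨h1, h2, h3, h4, h5, h6, h7⟩ := h
  split_ifs with hv hb hb
  · -- visited but not yet summed: impossible for a nonzero cell
    exfalso
    simp only [Bool.and_eq_true, Bool.not_eq_true', beq_eq_false_iff_ne, ne_eq,
      Bool.not_eq_true] at hb
    have hpNZ : NZc grid n m (i, j) := ⟨hij, hb.1⟩
    have : (i, j) ∈ sB.1 := (h6 (i, j) hpNZ).mp hv
    rw [(PySem.Set.contains_iff sB.1 (i, j)).mpr this] at hb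
    exact absurd hb.2 (by simp)
  · -- both sides skip
    exact ⟨h1, h2, h3, h4, h5, h6, h7⟩
  · -- a fresh cell A flood-fills and B grows: the main case
    have hv' : vget sA.1 i j = false := by simpa using hv
    simp only [Bool.and_eq_true, Bool.not_eq_true', beq_eq_false_iff_ne, ne_eq,
      Bool.not_eq_true] at hb
    have hz : cellVal grid i j ≠ 0 := hb.1
    have hnseen : (i, j) ∉ sB.1 := by
      intro hm
      rw [(PySem.Set.contains_iff sB.1 (i, j)).mpr hm] at hb
      exact absurd hb.2 (by simp)
    have hpNZ : NZc grid n m (i, j) := ⟨hij, hz⟩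
    have hV0 : ∀ p, Conn grid n m (i, j) p → vget sA.1 p.1 p.2 = false := by
      intro p hp
      by_contra hcon
      have hpt : vget sA.1 p.1 p.2 = true := by simpa using hcon
      have hpm : p ∈ sB.1 := (h6 p (conn_nz hp hpNZ)).mp hpt
      exact hv ((h6 (i, j) hpNZ).mpr (h7 p hpm (i, j) (conn_symm hp)))
    obtain ⟨M', hsubM, hndM, hshR, hviewR, hMR, hcompR, hvolR⟩ :=
      dfsA_run grid n m (i, j) hpNZ sA.1 hV0 (5 * n * m + 1) [(i, j)] sA.1 0 []
        h1 (fun p _ => by simp) List.nodup_nil (by simp)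
        (by
          intro p hp
          rcases List.mem_cons.mp hp with rfl | hp
          · exact ⟨hij, Or.inl Relation.ReflTransGen.refl⟩
          · exact absurd hp List.not_mem_nil)
        (by simp) (Or.inr List.mem_cons_self) (by simp)
        (by
          have hle := unvis_le n m sA.1
          have hmul : 5 * n * m = 5 * (n * m) := by ring
          simp only [List.length_cons, List.length_nil]
          omega)
    have hofl : PySem.Set.ofList [(i, j)] = ([(i, j)] : List (Int × Int)) := rfl
    obtain ⟨hndC, hmemC⟩ :=
      loopB_run grid n m (i, j) hpNZ (n * m + 2)
        (PySem.Set.ofList [(i, j)]) (PySem.Set.ofList [(i, j)])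
        (PySem.Set.nodup_ofList _)
        (by
          rw [hofl]
          intro q hq
          rcases List.mem_cons.mp hq with rfl | hq
          · exact Relation.ReflTransGen.refl
          · exact absurd hq List.not_mem_nil)
        (by rw [hofl]; exact List.mem_cons_self)
        (fun q hq => hq)
        (fun a ha q e => Or.inr ha)
        (by
          have hle : (cellsList n m).countP
              (fun p => !(decide (p ∈ PySem.Set.ofList [(i, j)]))) ≤ n * m := by
            rw [← length_cellsList n m]; exact List.countP_le_length
          omega)
    have hFmem : ∀ d, d ∈ M'.filter (fun d => !(cellVal grid d.1 d.2 == 0)) ↔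
        Conn grid n m (i, j) d := by
      intro d
      rw [List.mem_filter]
      constructor
      · rintro ⟨hdM, hdnz⟩
        rcases (hMR d hdM).2 with h | h
        · exact h
        · simp [h] at hdnz
      · intro hconn
        refine ⟨hcompR d hconn, by simp [(conn_nz hconn hpNZ).2]⟩
    have hsumA : (dfsA grid n m (5 * n * m + 1) [(i, j)] sA.1 0).2 =
        compSum grid n m (i, j) := by
      rw [hvolR]
      exact sum_eq_compSum hpNZ _ (hndM.filter _) hFmem
    have hsumB : ((loopB grid n m (n * m + 2) (PySem.Set.ofList [(i, j)])
        (PySem.Set.ofList [(i, j)])).map (fun p => cellVal grid p.1 p.2)).sum =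
        compSum grid n m (i, j) :=
      sum_eq_compSum hpNZ _ hndC hmemC
    refine ⟨hshR, ?_, ?_, PySem.Set.nodup_union _ _ h4, ?_, ?_, ?_⟩
    · show max sA.2 (dfsA grid n m (5 * n * m + 1) [(i, j)] sA.1 0).2 = max sB.2 _
      rw [hsumA, hsumB, h2]
    · exact le_trans h3 (le_max_left _ _)
    · intro p hp
      rcases (PySem.Set.mem_union sB.1 _ p).mp hp with h | h
      · exact h5 p h
      · exact conn_nz ((hmemC p).mp h) hpNZ
    · intro p hp
      show vget (dfsA grid n m (5 * n * m + 1) [(i, j)] sA.1 0).1 p.1 p.2 = true ↔ _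
      rw [hviewR p hp.1, PySem.Set.mem_union]
      constructor
      · rintro (h | h)
        · exact Or.inl ((h6 p hp).mp h)
        · refine Or.inr ((hmemC p).mpr ?_)
          rcases (hMR p h).2 with h' | h'
          · exact h'
          · exact absurd h' hp.2
      · rintro (h | h)
        · exact Or.inl ((h6 p hp).mpr h)
        · exact Or.inr (hcompR p ((hmemC p).mp h))
    · intro p hp q hconn
      rw [PySem.Set.mem_union] at hp ⊢
      rcases hp with h | h
      · exact Or.inl (h7 p h q hconn)
      · exact Or.inr ((hmemC q).mpr (Relation.ReflTransGen.trans ((hmemC p).mp h) hconn))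
  · -- A marks a cell B ignores: it must be a zero cell
    have hv' : vget sA.1 i j = false := by simpa using hv
    have hz : cellVal grid i j = 0 := by
      by_contra hnz
      have hnseen : (i, j) ∉ sB.1 := fun hm => hv ((h6 (i, j) ⟨hij, hnz⟩).mpr hm)
      exact hb (by simp [hnz, hnseen])
    show RelAB grid n m
      ((dfsA grid n m (5 * n * m + 1) [(i, j)] sA.1 0).1,
       max sA.2 (dfsA grid n m (5 * n * m + 1) [(i, j)] sA.1 0).2) sB
    rw [dfsA_zero_start grid n m (5 * n * m) i j sA.1 0 hv' hz]
    refine ⟨vshape_vset h1 hij, ?_, ?_, h4, h5, ?_, h7⟩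
    · show max sA.2 0 = sB.2
      rw [max_eq_left h3, h2]
    · exact le_trans h3 (le_max_left _ _)
    · intro p hp
      have hne : (p.1, p.2) ≠ (i, j) := by
        intro hc
        apply hp.2
        rw [show p = (p.1, p.2) from rfl, hc]
        exact hz
      show vget (vset sA.1 i j) p.1 p.2 = true ↔ _
      rw [show vget (vset sA.1 i j) p.1 p.2 = vget sA.1 p.1 p.2 from by
        obtain ⟨a, b⟩ := p
        exact vget_vset_of_ne h1 hij hp.1 hne]
      exact h6 p hp

-- ===== VERDICT (by name: the statement is the Claim_ definition above) =====
theorem solve_spec : Claim_equal_solve := by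
  intro grid _ _
  unfold Spec_solve
  show solve grid = solve_alt grid
  have hA : solve grid =
      ((List.range grid.length).foldl (fun st (i : Nat) =>
        (List.range ((PySem.List.pyGet? grid 0).getD []).length).foldl (fun st (j : Nat) =>
          if vget st.1 (i : Int) (j : Int) then st
          else
            let r := dfsA grid grid.length ((PySem.List.pyGet? grid 0).getD []).length
              (5 * grid.length * ((PySem.List.pyGet? grid 0).getD []).length + 1)
              [((i : Int), (j : Int))] st.1 0
            (r.1, max st.2 r.2)) st)
        (List.replicate grid.length (List.replicate ((PySem.List.pyGet? grid 0).getD []).length false), 0)).2 := by unfold solve; rfl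
  have hB : solve_alt grid =
      ((List.range grid.length).foldl (fun st (i : Nat) =>
        (List.range ((PySem.List.pyGet? grid 0).getD []).length).foldl (fun st (j : Nat) =>
          if !(cellVal grid (i : Int) (j : Int) == 0) &&
             !(PySem.Set.contains st.1 ((i : Int), (j : Int))) then
            let comp := loopB grid grid.length ((PySem.List.pyGet? grid 0).getD []).length
              (grid.length * ((PySem.List.pyGet? grid 0).getD []).length + 2)
              (PySem.Set.ofList [((i : Int), (j : Int))]) (PySem.Set.ofList [((i : Int), (j : Int))])
            (PySem.Set.union st.1 comp,
             max st.2 ((comp.map (fun p => cellVal grid p.1 p.2)).sum))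
          else st) st)
        ((PySem.Set.empty : PySem.Set (Int × Int)), 0)).2 := by unfold solve_alt; rfl
  rw [hA, hB]
  suffices hrel : RelAB grid grid.length ((PySem.List.pyGet? grid 0).getD []).length
      ((List.range grid.length).foldl (fun st (i : Nat) =>
        (List.range ((PySem.List.pyGet? grid 0).getD []).length).foldl (fun st (j : Nat) =>
          if vget st.1 (i : Int) (j : Int) then st
          else
            let r := dfsA grid grid.length ((PySem.List.pyGet? grid 0).getD []).length
              (5 * grid.length * ((PySem.List.pyGet? grid 0).getD []).length + 1)
              [((i : Int), (j : Int))] st.1 0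
            (r.1, max st.2 r.2)) st)
        (List.replicate grid.length (List.replicate ((PySem.List.pyGet? grid 0).getD []).length false), 0))
      ((List.range grid.length).foldl (fun st (i : Nat) =>
        (List.range ((PySem.List.pyGet? grid 0).getD []).length).foldl (fun st (j : Nat) =>
          if !(cellVal grid (i : Int) (j : Int) == 0) &&
             !(PySem.Set.contains st.1 ((i : Int), (j : Int))) then
            let comp := loopB grid grid.length ((PySem.List.pyGet? grid 0).getD []).length
              (grid.length * ((PySem.List.pyGet? grid 0).getD []).length + 2)
              (PySem.Set.ofList [((i : Int), (j : Int))]) (PySem.Set.ofList [((i : Int), (j : Int))])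
            (PySem.Set.union st.1 comp,
             max st.2 ((comp.map (fun p => cellVal grid p.1 p.2)).sum))
          else st) st)
        ((PySem.Set.empty : PySem.Set (Int × Int)), 0)) by
    exact hrel.2.1
  refine foldl_rel _ _ _ (List.range grid.length) ?_ _ _ ?_
  · intro i hi a b hab
    refine foldl_rel _ _ _ (List.range ((PySem.List.pyGet? grid 0).getD []).length)
      ?_ a b hab
    intro j hj a' b' hab'
    have him := List.mem_range.mp hi
    have hjm := List.mem_range.mp hj
    exact cell_step grid grid.length ((PySem.List.pyGet? grid 0).getD []).length
      (i : Int) (j : Int)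
      ⟨Int.natCast_nonneg _, by simp only []; exact_mod_cast him, Int.natCast_nonneg _, by simp only []; exact_mod_cast hjm⟩
      a' b' hab'
  · refine ⟨vshape_replicate _ _, rfl, le_refl 0, List.nodup_nil, ?_, ?_, ?_⟩
    · intro p hp; exact absurd hp List.not_mem_nil
    · intro p hp
      rw [show vget (List.replicate grid.length
          (List.replicate ((PySem.List.pyGet? grid 0).getD []).length false)) p.1 p.2 = false
        from vget_replicate hp.1]
      simp [PySem.Set.empty]
    · intro p hp; exact absurd hp List.not_mem_nil
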